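-- pv_equiv track=rewrite | github.com/aorursy/new-nb-8 | yangxh1791_keras-bert.py | get_segments
-- ===== SOURCE A (Python) =====
-- def get_segments(tokens, max_seq_length):
--
--     """Segments: 0 for the first sequence, 1 for the second"""
--
--     segments = []
--
--     current_segment_id = 0
--
--     for token in tokens:
--
--         segments.append(current_segment_id)
--
--         if token == "[SEP]":
--
--             current_segment_id = 1
--
--     return segments + [0] * (max_seq_length - len(tokens))
-- ===== SOURCE B (Python) =====
-- def get_segments(tokens, max_seq_length):
--     """Segments: 0 for the first sequence, 1 for the second"""
--     if "[SEP]" in tokens: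
--         i = tokens.index("[SEP]")
--         segments = [0] * (i + 1) + [1] * (len(tokens) - i - 1)
--     else:
--         segments = [0] * len(tokens)
--     return segments + [0] * (max_seq_length - len(tokens))
-- ===== Notes on version B (the rewrite author's own statement) =====
-- stated objective: idiomatic
-- what changed: Replaced the element-by-element loop with a latching flag by locating the first '[SEP]' via list.index and constructing the segment list directly by list repetition and concatenation.
import Mathlib
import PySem

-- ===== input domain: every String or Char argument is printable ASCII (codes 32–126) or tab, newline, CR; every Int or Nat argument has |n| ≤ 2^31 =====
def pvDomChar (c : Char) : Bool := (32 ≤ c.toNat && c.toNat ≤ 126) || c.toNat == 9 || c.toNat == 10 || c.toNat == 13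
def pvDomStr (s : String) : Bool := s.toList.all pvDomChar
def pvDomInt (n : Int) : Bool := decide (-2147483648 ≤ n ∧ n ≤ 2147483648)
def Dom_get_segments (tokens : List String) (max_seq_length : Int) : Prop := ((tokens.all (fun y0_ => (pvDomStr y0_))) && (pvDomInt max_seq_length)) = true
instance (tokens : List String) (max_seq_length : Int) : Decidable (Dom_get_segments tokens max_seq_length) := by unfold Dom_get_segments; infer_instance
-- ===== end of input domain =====

-- B replaces A's flag-latching loop by index-then-construct via list repetition (idiomatic decomposition, same cost).
-- ===== PORT A =====
-- the for-loop of A, carrying the same state (segments, current_segment_id)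
def getSegmentsLoop (tokens : List String) (segments : List Int) (cur : Int) : List Int :=
  match tokens with
  | [] => segments
  | t :: ts => getSegmentsLoop ts (segments ++ [cur]) (if t = "[SEP]" then 1 else cur)

def get_segments (tokens : List String) (max_seq_length : Int) : List Int :=
  getSegmentsLoop tokens [] 0 ++ List.replicate (max_seq_length - tokens.length).toNat 0

-- ===== PORT B =====
def get_segments_alt (tokens : List String) (max_seq_length : Int) : List Int :=
  (match PySem.List.index? tokens "[SEP]" with
   | some i => List.replicate (i + 1) (0 : Int) ++ List.replicate (tokens.length - i - 1) (1 : Int)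
   | none => List.replicate tokens.length (0 : Int))
  ++ List.replicate (max_seq_length - tokens.length).toNat 0

-- ===== PRECONDITION & SPEC =====
def Spec_get_segments (tokens : List String) (max_seq_length : Int) (out : List Int) : Prop := out = get_segments_alt tokens max_seq_length
instance (tokens : List String) (max_seq_length : Int) (out : List Int) : Decidable (Spec_get_segments tokens max_seq_length out) := by unfold Spec_get_segments; infer_instance

-- ===== CLAIM (what is proved, stated in full; the proofs are below) =====
def Claim_equal_get_segments : Prop := ∀ (tokens : List String) (max_seq_length : Int), Dom_get_segments tokens max_seq_length → Spec_get_segments tokens max_seq_length (get_segments tokens max_seq_length)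

-- ===== LEMMAS AND PROOFS =====

lemma getSegmentsLoop_append (ts : List String) (segs : List Int) (cur : Int) :
    getSegmentsLoop ts segs cur = segs ++ getSegmentsLoop ts [] cur := by
  induction ts generalizing segs cur with
  | nil => simp [getSegmentsLoop]
  | cons t ts ih =>
      simp only [getSegmentsLoop]
      rw [ih (segs ++ [cur]), ih ([] ++ [cur])]
      simp

lemma getSegmentsLoop_one (ts : List String) :
    getSegmentsLoop ts [] 1 = List.replicate ts.length 1 := by
  induction ts with
  | nil => simp [getSegmentsLoop]
  | cons t ts ih =>
      simp only [getSegmentsLoop, ite_self]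
      rw [getSegmentsLoop_append, ih]
      simp [List.replicate_succ]

lemma getSegmentsLoop_zero (ts : List String) :
    getSegmentsLoop ts [] 0 =
      (match PySem.List.index? ts "[SEP]" with
       | some i => List.replicate (i + 1) (0 : Int) ++ List.replicate (ts.length - i - 1) (1 : Int)
       | none => List.replicate ts.length (0 : Int)) := by
  induction ts with
  | nil => simp [getSegmentsLoop, PySem.List.index?]
  | cons t ts ih =>
      by_cases h : t = "[SEP]"
      · subst h
        rw [PySem.List.index?_cons_self]
        simp only [getSegmentsLoop]
        rw [if_true, getSegmentsLoop_append, getSegmentsLoop_one]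
        simp [List.replicate_succ]
      · rw [PySem.List.index?_cons_of_ne ts h]
        simp only [getSegmentsLoop, if_neg h]
        rw [getSegmentsLoop_append, ih]
        cases hix : PySem.List.index? ts "[SEP]" with
        | none => simp [List.replicate_succ]
        | some i =>
            simp only [Option.map_some]
            simp [List.replicate_succ]

-- ===== VERDICT (by name: the statement is the Claim_ definition above) =====
theorem get_segments_spec : Claim_equal_get_segments := by
  intro tokens max_seq_length _
  unfold Spec_get_segments get_segments get_segments_alt
  rw [getSegmentsLoop_zero]
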